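-- pv_equiv track=rewrite | github.com/Chaaany/boj_answer | boj_1011.py | F
-- ===== SOURCE A (Python) =====
-- def F(x, y):
--     distance = y - x
--     i = 1
--     while True:
--         if i % 2 == 0:
--             if (i // 2) ** 2 < distance <= (i // 2) * (i // 2 + 1):
--                 return i
--         if i % 2 != 0:
--             if (i // 2) * (i // 2 + 1) < distance <= (i // 2 + 1) ** 2:
--                 return i
--         i += 1
-- ===== SOURCE B (Python) =====
-- def _maxdist(i):
--     h = i // 2
--     return h * (h + 1) if i % 2 == 0 else (h + 1) ** 2
--
--
-- def F(x, y):
--     d = y - x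
--     lo, hi = 1, 2 * d
--     while lo < hi:
--         mid = (lo + hi) // 2
--         if _maxdist(mid) >= d:
--             hi = mid
--         else:
--             lo = mid + 1
--     return lo
-- ===== Notes on version B (the rewrite author's own statement) =====
-- stated objective: alternative
-- what changed: Replaced A's linear scan of candidate answers i = 1, 2, 3, ... with a binary search for the least i whose maximal reachable distance is at least y - x.
import Mathlib
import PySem

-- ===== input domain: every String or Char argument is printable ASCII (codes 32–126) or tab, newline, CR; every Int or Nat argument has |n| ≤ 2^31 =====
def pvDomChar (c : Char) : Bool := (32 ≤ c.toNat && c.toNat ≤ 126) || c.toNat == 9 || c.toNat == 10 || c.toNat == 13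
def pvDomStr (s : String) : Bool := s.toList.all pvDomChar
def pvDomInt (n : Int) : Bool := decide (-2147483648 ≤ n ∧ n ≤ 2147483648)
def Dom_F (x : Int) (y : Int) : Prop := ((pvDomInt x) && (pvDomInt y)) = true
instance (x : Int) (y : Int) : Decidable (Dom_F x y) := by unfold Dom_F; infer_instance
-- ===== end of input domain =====

-- B replaces A's linear scan of candidates i = 1, 2, ... with a binary search on the
-- least i whose maximal reachable distance is ≥ y - x (objective: alternative algorithm).

-- ===== PORT A =====
-- A's 'while True' loop, with a fuel bound of 2*(y-x)+2 iterations (for 1 ≤ y - x the loop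
-- returns within that many steps, proved below; for y - x ≤ 0 the Python loops forever,
-- which Pre_F excludes).
def Floop (fuel : Nat) (d : Int) (i : Int) : Int :=
  match fuel with
  | 0 => 0
  | f + 1 =>
    if PySem.Int.mod i 2 = 0 ∧
        (PySem.Int.floordiv i 2) ^ 2 < d ∧
        d ≤ (PySem.Int.floordiv i 2) * (PySem.Int.floordiv i 2 + 1) then i
    else if PySem.Int.mod i 2 ≠ 0 ∧
        (PySem.Int.floordiv i 2) * (PySem.Int.floordiv i 2 + 1) < d ∧
        d ≤ (PySem.Int.floordiv i 2 + 1) ^ 2 then i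
    else Floop f d (i + 1)

def F (x : Int) (y : Int) : Int := Floop (2 * (y - x) + 2).toNat (y - x) 1

-- ===== PORT B =====
def maxdist (i : Int) : Int :=
  let h := PySem.Int.floordiv i 2
  if PySem.Int.mod i 2 = 0 then h * (h + 1) else (h + 1) ^ 2

def bsearch (d lo hi : Int) : Int :=
  if h : lo < hi then
    let mid := PySem.Int.floordiv (lo + hi) 2
    if d ≤ maxdist mid then bsearch d lo mid else bsearch d (mid + 1) hi
  else lo
termination_by (hi - lo).toNat
decreasing_by
  · have h1 : lo ≤ PySem.Int.floordiv (lo + hi) 2 :=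
      (PySem.Int.floordiv_two_mid_bounds (le_of_lt h)).1
    have h2 : PySem.Int.floordiv (lo + hi) 2 < hi := by
      rw [PySem.Int.floordiv_lt_iff_lt_mul (by omega)]; omega
    omega
  · have h1 : lo ≤ PySem.Int.floordiv (lo + hi) 2 :=
      (PySem.Int.floordiv_two_mid_bounds (le_of_lt h)).1
    have h2 : PySem.Int.floordiv (lo + hi) 2 ≤ hi :=
      (PySem.Int.floordiv_two_mid_bounds (le_of_lt h)).2
    omega

def F_alt (x : Int) (y : Int) : Int := bsearch (y - x) 1 (2 * (y - x))

-- ===== PRECONDITION & SPEC =====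
-- Pre_F excludes y - x ≤ 0, on which A's 'while True' loop never returns (it diverges).
def Pre_F (x : Int) (y : Int) : Prop := 1 ≤ y - x
instance (x : Int) (y : Int) : Decidable (Pre_F x y) := by unfold Pre_F; infer_instance
def pvWitness_F : Int × Int := (0, 7)

def Spec_F (x : Int) (y : Int) (out : Int) : Prop := out = F_alt x y
instance (x : Int) (y : Int) (out : Int) : Decidable (Spec_F x y out) := by unfold Spec_F; infer_instance

-- ===== CLAIM (what is proved, stated in full; the proofs are below) =====
def Claim_equal_F : Prop := ∀ (x : Int) (y : Int), Dom_F x y → Pre_F x y → Spec_F x y (F x y)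

-- ===== LEMMAS AND PROOFS =====

lemma maxdist_even (k : Int) : maxdist (2 * k) = k * (k + 1) := by
  have h1 : PySem.Int.floordiv (2 * k) 2 = (2 * k) / 2 :=
    PySem.Int.floordiv_eq_ediv_of_pos (by omega)
  have h2 : PySem.Int.mod (2 * k) 2 = (2 * k) % 2 :=
    PySem.Int.mod_eq_emod_of_pos (by omega)
  have h3 : (2 * k) / 2 = k := by omega
  have h4 : (2 * k) % 2 = 0 := by omega
  simp [maxdist, h1, h2, h3, h4]

lemma maxdist_odd (k : Int) : maxdist (2 * k + 1) = (k + 1) ^ 2 := by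
  have h1 : PySem.Int.floordiv (2 * k + 1) 2 = (2 * k + 1) / 2 :=
    PySem.Int.floordiv_eq_ediv_of_pos (by omega)
  have h2 : PySem.Int.mod (2 * k + 1) 2 = (2 * k + 1) % 2 :=
    PySem.Int.mod_eq_emod_of_pos (by omega)
  have h3 : (2 * k + 1) / 2 = k := by omega
  have h4 : (2 * k + 1) % 2 = 1 := by omega
  simp [maxdist, h1, h2, h3, h4]

lemma maxdist_step (i : Int) (hi : 0 ≤ i) : maxdist i ≤ maxdist (i + 1) := by
  rcases Int.even_or_odd i with ⟨k, hk⟩ | ⟨k, hk⟩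
  · have hk' : i = 2 * k := by omega
    have hk0 : 0 ≤ k := by omega
    rw [hk', maxdist_even, show 2 * k + 1 = 2 * k + 1 from rfl, maxdist_odd]
    nlinarith
  · have hk' : i = 2 * k + 1 := by omega
    have hk0 : 0 ≤ k := by omega
    rw [hk', maxdist_odd, show 2 * k + 1 + 1 = 2 * (k + 1) from by ring, maxdist_even]
    nlinarith

lemma maxdist_mono_aux : ∀ (n : Nat) (a : Int), 0 ≤ a → maxdist a ≤ maxdist (a + n) := by
  intro n
  induction n with
  | zero => intro a _; simp
  | succ m ih =>
    intro a ha
    have h1 := ih a ha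
    have h2 := maxdist_step (a + m) (by omega)
    have h3 : a + (↑(m + 1) : Int) = (a + m) + 1 := by push_cast; ring
    rw [h3]; omega

lemma maxdist_mono {a b : Int} (ha : 0 ≤ a) (hab : a ≤ b) : maxdist a ≤ maxdist b := by
  have h := maxdist_mono_aux (b - a).toNat a ha
  have h3 : a + ((b - a).toNat : Int) = b := by omega
  rw [h3] at h; exact h

def Good (d r : Int) : Prop := 1 ≤ r ∧ d ≤ maxdist r ∧ maxdist (r - 1) < d

lemma Good_uniq {d r r' : Int} (h : Good d r) (h' : Good d r') : r = r' := by
  obtain ⟨h1, h2, h3⟩ := h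
  obtain ⟨h1', h2', h3'⟩ := h'
  by_contra hne
  rcases lt_or_gt_of_ne hne with hlt | hlt
  · have := maxdist_mono (a := r) (b := r' - 1) (by omega) (by omega); omega
  · have := maxdist_mono (a := r') (b := r - 1) (by omega) (by omega); omega

lemma Good_exists_aux (d : Int) :
    ∀ (n : Nat) (i : Int), 0 ≤ i → maxdist i < d → d ≤ maxdist (i + n) → ∃ r, Good d r := by
  intro n
  induction n with
  | zero => intro i _ h1 h2; simp at h2; omega
  | succ m ih =>
    intro i hi h1 h2
    by_cases hc : maxdist (i + 1) < d
    · exact ih (i + 1) (by omega) hc (by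
        have : (i + 1) + (m : Int) = i + ((m + 1 : Nat) : Int) := by push_cast; ring
        rw [this]; exact h2)
    · exact ⟨i + 1, by omega, by omega, by simpa using h1⟩

lemma Good_exists {d : Int} (hd : 1 ≤ d) : ∃ r, Good d r ∧ r ≤ 2 * d := by
  have h0 : maxdist 0 < d := by
    have := maxdist_even 0; simp at this
    simpa [this] using hd
  have h2d : d ≤ maxdist (2 * d) := by
    rw [maxdist_even]; nlinarith
  obtain ⟨r, hr⟩ := Good_exists_aux d (2 * d).toNat 0 le_rfl h0
    (by rw [show (0 : Int) + ((2 * d).toNat : Int) = 2 * d from by omega]; exact h2d)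
  refine ⟨r, hr, ?_⟩
  by_contra hgt
  obtain ⟨h1, h2, h3⟩ := hr
  have := maxdist_mono (a := 2 * d) (b := r - 1) (by omega) (by omega)
  omega

-- A's two branch conditions at index i, combined, test exactly 'maxdist (i-1) < d ≤ maxdist i'.
lemma condA_iff (d i : Int) (hi : 1 ≤ i) :
    ((PySem.Int.mod i 2 = 0 ∧
        (PySem.Int.floordiv i 2) ^ 2 < d ∧
        d ≤ (PySem.Int.floordiv i 2) * (PySem.Int.floordiv i 2 + 1)) ∨
      (PySem.Int.mod i 2 ≠ 0 ∧
        (PySem.Int.floordiv i 2) * (PySem.Int.floordiv i 2 + 1) < d ∧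
        d ≤ (PySem.Int.floordiv i 2 + 1) ^ 2))
    ↔ (maxdist (i - 1) < d ∧ d ≤ maxdist i) := by
  have hfd : PySem.Int.floordiv i 2 = i / 2 := PySem.Int.floordiv_eq_ediv_of_pos (by omega)
  have hmd : PySem.Int.mod i 2 = i % 2 := PySem.Int.mod_eq_emod_of_pos (by omega)
  rcases Int.even_or_odd i with ⟨k, hk⟩ | ⟨k, hk⟩
  · have hk' : i = 2 * k := by omega
    have hk1 : 1 ≤ k := by omega
    have h1 : i / 2 = k := by omega
    have h2 : i % 2 = 0 := by omega
    have hm1 : maxdist (i - 1) = k ^ 2 := by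
      rw [show i - 1 = 2 * (k - 1) + 1 from by omega, maxdist_odd]; ring
    have hm2 : maxdist i = k * (k + 1) := by rw [hk', maxdist_even]
    rw [hfd, hmd, h1, h2, hm1, hm2]
    simp
  · have hk' : i = 2 * k + 1 := by omega
    have hk0 : 0 ≤ k := by omega
    have h1 : i / 2 = k := by omega
    have h2 : i % 2 = 1 := by omega
    have hm1 : maxdist (i - 1) = k * (k + 1) := by
      rw [show i - 1 = 2 * k from by omega, maxdist_even]
    have hm2 : maxdist i = (k + 1) ^ 2 := by rw [hk', maxdist_odd]
    rw [hfd, hmd, h1, h2, hm1, hm2]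
    simp

lemma Floop_eq : ∀ (f : Nat) (d i r : Int), Good d r → 1 ≤ i → i ≤ r →
    maxdist (i - 1) < d → (r - i).toNat < f → Floop f d i = r := by
  intro f
  induction f with
  | zero => intro d i r _ _ _ _ h; omega
  | succ g ih =>
    intro d i r hr hi1 hir hlt hfuel
    by_cases hle : d ≤ maxdist i
    · have heq : i = r := Good_uniq ⟨hi1, hle, hlt⟩ hr
      have hcond := (condA_iff d i hi1).mpr ⟨hlt, hle⟩
      rw [Floop]
      rcases Decidable.em (PySem.Int.mod i 2 = 0 ∧
          (PySem.Int.floordiv i 2) ^ 2 < d ∧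
          d ≤ (PySem.Int.floordiv i 2) * (PySem.Int.floordiv i 2 + 1)) with hc1 | hc1
      · rw [if_pos hc1]; exact heq
      · rcases hcond with hc | hc
        · exact absurd hc hc1
        · rw [if_neg hc1, if_pos hc]; exact heq
    · have hgt : maxdist i < d := by omega
      have hnc : ¬ (maxdist (i - 1) < d ∧ d ≤ maxdist i) := by omega
      have hcond := (condA_iff d i hi1).not.mpr hnc
      have hne : i ≠ r := by
        intro he; exact hle (he ▸ hr.2.1)
      rw [Floop, if_neg (fun h => hcond (Or.inl h)), if_neg (fun h => hcond (Or.inr h))]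
      exact ih d (i + 1) r hr (by omega) (by omega) (by simpa using hgt) (by omega)

lemma bsearch_eq : ∀ (n : Nat) (d lo hi r : Int), (hi - lo).toNat ≤ n → Good d r →
    1 ≤ lo → lo ≤ r → r ≤ hi → maxdist (lo - 1) < d → d ≤ maxdist hi →
    bsearch d lo hi = r := by
  intro n
  induction n with
  | zero =>
    intro d lo hi r hn _ _ h1 h2 _ _
    have : ¬ lo < hi := by omega
    rw [bsearch, dif_neg this]; omega
  | succ m ih =>
    intro d lo hi r hn hr hlo1 hlor hrhi hlow hhigh
    obtain ⟨hg1, hg2, hg3⟩ := id hr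
    by_cases hlt : lo < hi
    · have hmid1 : lo ≤ PySem.Int.floordiv (lo + hi) 2 :=
        (PySem.Int.floordiv_two_mid_bounds (le_of_lt hlt)).1
      have hmid2 : PySem.Int.floordiv (lo + hi) 2 < hi := by
        rw [PySem.Int.floordiv_lt_iff_lt_mul (by omega)]; omega
      rw [bsearch, dif_pos hlt]
      set mid := PySem.Int.floordiv (lo + hi) 2 with hmiddef
      by_cases hc : d ≤ maxdist mid
      · rw [if_pos hc]
        have hrmid : r ≤ mid := by
          by_contra hgt
          have := maxdist_mono (a := mid) (b := r - 1) (by omega) (by omega)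
          omega
        exact ih d lo mid r (by omega) hr hlo1 hlor hrmid hlow hc
      · rw [if_neg hc]
        have hmr : mid + 1 ≤ r := by
          by_contra hle
          have := maxdist_mono (a := r) (b := mid) (by omega) (by omega)
          omega
        exact ih d (mid + 1) hi r (by omega) hr (by omega) hmr hrhi
          (by simpa using (by omega : maxdist mid < d)) hhigh
    · have : lo = r := by omega
      rw [bsearch, dif_neg hlt]; omega

-- ===== VERDICT (by name: the statement is the Claim_ definition above) =====
theorem F_spec : Claim_equal_F := by
  intro x y _ hpre
  unfold Pre_F at hpre
  unfold Spec_F F F_alt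
  set d := y - x with hd
  obtain ⟨r, hr, hrle⟩ := Good_exists hpre
  have h0 : maxdist 0 < d := by
    have := maxdist_even 0; simp at this; omega
  have h2d : d ≤ maxdist (2 * d) := by rw [maxdist_even]; nlinarith
  have hA : Floop (2 * d + 2).toNat d 1 = r :=
    Floop_eq _ d 1 r hr le_rfl hr.1 (by simpa using h0) (by omega)
  have hB : bsearch d 1 (2 * d) = r :=
    bsearch_eq (2 * d - 1).toNat d 1 (2 * d) r (by omega) hr le_rfl hr.1 hrle
      (by simpa using h0) h2d
  rw [hA, hB]
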